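-- pv_equiv track=rewrite | github.com/Azarta2Zygoto/visualization-wood | compresser.py | erased_one_value_column
-- ===== SOURCE A (Python) =====
-- def erased_one_value_column(data:list[list[str]], header:list[str], column_indexes:list[int])->tuple[list[list[str]], list[str]]:
--     """
--     Erases columns with distinct elements less than or equal to 1.
--
--     Args:
--         data (list): The data to process.
--         header (list[str]): The header of the data.
--         column_indexes (list[int]): The list of distinct element counts for each column.
--
--     Returns:
--         list: The modified data with rows containing the value removed.
--     """
--     new_data = []
--     for element in data:
--         sub_element = []
--         for i, value in enumerate(element):
--             if column_indexes[i] > 1: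
--                 sub_element.append(value)
--         new_data.append(sub_element)
--
--     new_header = []
--     for i, hd in enumerate(header):
--         if column_indexes[i] > 1:
--             new_header.append(hd)
--
--     return new_data, new_header
-- ===== SOURCE B (Python) =====
-- def erased_one_value_column(data: list[list[str]], header: list[str], column_indexes: list[int]) -> tuple[list[list[str]], list[str]]:
--     # Deletion-based: collect the doomed column positions (count <= 1), then
--     # physically delete them, in descending order, from a copy of each row and
--     # of the header (skipping positions past a short row's end).
--     doomed = [i for i, c in enumerate(column_indexes) if c <= 1]
--     doomed.reverse()
--
--     def strip(row):
--         row = row[:]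
--         for i in doomed:
--             if i < len(row):
--                 del row[i]
--         return row
--
--     return [strip(row) for row in data], strip(header)
-- ===== Notes on version B (the rewrite author's own statement) =====
-- stated objective: alternative
-- what changed: B inverts the algorithm: instead of A's per-cell keep-test that rebuilds each row from kept cells, B computes the doomed column positions (count <= 1) once, reverses them, and deletes exactly those positions in descending order from a copy of each row and of the header.
import Mathlib
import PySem

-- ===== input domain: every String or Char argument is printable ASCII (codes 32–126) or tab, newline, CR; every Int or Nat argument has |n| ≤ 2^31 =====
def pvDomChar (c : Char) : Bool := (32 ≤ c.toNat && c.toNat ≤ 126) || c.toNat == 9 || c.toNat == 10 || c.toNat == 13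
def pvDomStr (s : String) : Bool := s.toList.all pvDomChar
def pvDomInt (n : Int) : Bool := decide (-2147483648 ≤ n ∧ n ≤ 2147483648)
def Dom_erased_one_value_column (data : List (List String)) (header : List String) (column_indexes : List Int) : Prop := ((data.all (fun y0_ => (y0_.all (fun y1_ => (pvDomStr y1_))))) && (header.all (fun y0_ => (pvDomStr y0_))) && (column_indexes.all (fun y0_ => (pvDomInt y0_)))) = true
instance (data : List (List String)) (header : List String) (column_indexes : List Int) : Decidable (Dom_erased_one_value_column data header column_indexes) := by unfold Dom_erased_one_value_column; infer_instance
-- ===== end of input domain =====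

-- B deletes the doomed columns (count <= 1) in descending order from copies, instead of A's per-cell keep-test; an alternative decomposition, no speed claim.

-- ===== PORT A =====
-- column_indexes[i] is ported as pyGetD; Pre_ guarantees the index is in range (Python raises IndexError outside Pre_).
def erased_one_value_column (data : List (List String)) (header : List String) (column_indexes : List Int) : List (List String) × List String :=
  let new_data := data.foldl (fun nd element =>
    let sub_element := (PySem.List.enumerate element 0).foldl
      (fun se p => if 1 < PySem.List.pyGetD column_indexes p.1 0 then se ++ [p.2] else se) []
    nd ++ [sub_element]) []
  let new_header := (PySem.List.enumerate header 0).foldl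
    (fun nh p => if 1 < PySem.List.pyGetD column_indexes p.1 0 then nh ++ [p.2] else nh) []
  (new_data, new_header)

-- ===== PORT B =====
/-- B's `strip`: delete each doomed position (already descending, all ≥ 0 since they
come from `enumerate`) from the row, skipping positions past the row's end;
`del row[i]` on an in-range nonnegative `i` is exactly `List.eraseIdx i.toNat`. -/
def pvStrip (row : List String) (doomed : List Int) : List String :=
  doomed.foldl (fun r i => if i < (r.length : Int) then r.eraseIdx i.toNat else r) row

def erased_one_value_column_alt (data : List (List String)) (header : List String) (column_indexes : List Int) : List (List String) × List String :=
  let doomed := ((((PySem.List.enumerate column_indexes 0).filter (fun p => decide (p.2 ≤ 1))).map (·.1))).reverse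
  (data.map (fun row => pvStrip row doomed), pvStrip header doomed)

-- ===== PRECONDITION & SPEC =====
-- Pre_: exactly the inputs where A returns normally (A raises IndexError iff the header or some row is longer than column_indexes).
def Pre_erased_one_value_column (data : List (List String)) (header : List String) (column_indexes : List Int) : Prop :=
  header.length ≤ column_indexes.length ∧ ∀ row ∈ data, row.length ≤ column_indexes.length
instance (data : List (List String)) (header : List String) (column_indexes : List Int) : Decidable (Pre_erased_one_value_column data header column_indexes) := by unfold Pre_erased_one_value_column; infer_instance
def pvWitness_erased_one_value_column : List (List String) × List String × List Int := ([["a", "b"], ["c", "b"]], ["h1", "h2"], [2, 1])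

def Spec_erased_one_value_column (data : List (List String)) (header : List String) (column_indexes : List Int) (out : List (List String) × List String) : Prop := out = erased_one_value_column_alt data header column_indexes
instance (data : List (List String)) (header : List String) (column_indexes : List Int) (out : List (List String) × List String) : Decidable (Spec_erased_one_value_column data header column_indexes out) := by unfold Spec_erased_one_value_column; infer_instance

-- ===== CLAIM (what is proved, stated in full; the proofs are below) =====
def Claim_equal_erased_one_value_column : Prop := ∀ (data : List (List String)) (header : List String) (column_indexes : List Int), Dom_erased_one_value_column data header column_indexes → Pre_erased_one_value_column data header column_indexes → Spec_erased_one_value_column data header column_indexes (erased_one_value_column data header column_indexes)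

-- ===== LEMMAS AND PROOFS =====

/-- Common specification of one filtered row: walk the row and the counts in lockstep. -/
def pvSpecRow : List String → List Int → List String
  | [], _ => []
  | _, [] => []
  | x :: xs, c :: cs => if 1 < c then x :: pvSpecRow xs cs else pvSpecRow xs cs

lemma pvSpecRow_nil (cs : List Int) : pvSpecRow [] cs = [] := by cases cs <;> rfl

/-- A's inner enumerate-and-test loop computes `pvSpecRow`. -/
lemma pvRowA (ci : List Int) (xs : List String) (n : Nat) (acc : List String)
    (h : n + xs.length ≤ ci.length) :
    (PySem.List.enumerate xs (n : Int)).foldl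
      (fun se p => if 1 < PySem.List.pyGetD ci p.1 0 then se ++ [p.2] else se) acc
    = acc ++ pvSpecRow xs (ci.drop n) := by
  induction xs generalizing n acc with
  | nil => simp [PySem.List.enumerate, pvSpecRow_nil]
  | cons x xs ih =>
    have hn : n < ci.length := by simp at h; omega
    have hdrop : ci.drop n = ci[n] :: ci.drop (n + 1) := List.drop_eq_getElem_cons hn
    have hget : PySem.List.pyGetD ci (n : Int) 0 = ci[n] := by
      simp [PySem.List.pyGetD_natCast, List.getD, hn]
    rw [PySem.List.enumerate_cons]
    have hcast : ((n : Int) + 1) = ((n + 1 : Nat) : Int) := by push_cast; ring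
    simp only [List.foldl_cons, hget, hcast]
    rw [ih (n + 1) _ (by simp at h ⊢; omega)]
    rw [hdrop]
    by_cases hc : 1 < ci[n] <;> simp [pvSpecRow, hc]

/-- B's descending-deletion pass computes `pvSpecRow` too: the doomed positions of
`ci` starting at offset `n` leave `xs.take n` intact and filter `xs.drop n` by `ci`. -/
lemma pvRowB (ci : List Int) (xs : List String) (n : Nat)
    (h : xs.length ≤ n + ci.length) :
    pvStrip xs ((((PySem.List.enumerate ci (n : Int)).filter (fun p => decide (p.2 ≤ 1))).map (·.1)).reverse)
    = xs.take n ++ pvSpecRow (xs.drop n) ci := by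
  induction ci generalizing n with
  | nil =>
    have h' : xs.length ≤ n := by simpa using h
    have hx : xs.take n = xs := List.take_of_length_le h'
    have hd : xs.drop n = [] := List.drop_eq_nil_of_le h'
    simp [PySem.List.enumerate, pvStrip, hx, hd, pvSpecRow_nil]
  | cons c cs ih =>
    rw [PySem.List.enumerate_cons]
    have hcast : ((n : Int) + 1) = ((n + 1 : Nat) : Int) := by push_cast; ring
    have h' : xs.length ≤ n + 1 + cs.length := by simp [List.length_cons] at h; omega
    have ih' := ih (n + 1) h'
    by_cases hc : c ≤ 1
    · simp only [List.filter_cons, decide_eq_true_eq]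
      rw [if_pos hc]
      simp only [List.map_cons, List.reverse_cons]
      unfold pvStrip
      rw [List.foldl_append, hcast]
      have : (((PySem.List.enumerate cs ((n + 1 : Nat) : Int)).filter (fun p => decide (p.2 ≤ 1))).map (·.1)).reverse.foldl
          (fun r i => if i < (r.length : Int) then r.eraseIdx i.toNat else r) xs
          = xs.take (n + 1) ++ pvSpecRow (xs.drop (n + 1)) cs := ih'
      rw [this]
      simp only [List.foldl_cons, List.foldl_nil]
      by_cases hn : n < xs.length
      · have hdrop : xs.drop n = xs[n] :: xs.drop (n + 1) := List.drop_eq_getElem_cons hn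
        have htake : xs.take (n + 1) = xs.take n ++ [xs[n]] := List.take_succ_eq_append_getElem hn
        have hlen : ((xs.take (n + 1) ++ pvSpecRow (xs.drop (n + 1)) cs).length : Int) > (n : Int) := by
          have : (xs.take (n + 1)).length = n + 1 := by
            simp [List.length_take]; omega
          simp [this]; omega
        rw [if_pos (by exact_mod_cast hlen)]
        rw [htake, hdrop]
        have herase : ((xs.take n ++ [xs[n]]) ++ pvSpecRow (xs.drop (n + 1)) cs).eraseIdx ((n : Int)).toNat
            = xs.take n ++ pvSpecRow (xs.drop (n + 1)) cs := by
          have hnn : ((n : Int)).toNat = n := by omega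
          rw [hnn, List.append_assoc]
          rw [List.eraseIdx_append_of_length_le (by rw [List.length_take]; omega)]
          have h0 : n - min n xs.length = 0 := by omega
          simp [List.length_take, h0]
        rw [herase]
        simp [pvSpecRow, show ¬ (1 < c) by omega]
      · have htake1 : xs.take (n + 1) = xs := List.take_of_length_le (by omega)
        have htake : xs.take n = xs := List.take_of_length_le (by omega)
        have hd1 : xs.drop (n + 1) = [] := List.drop_eq_nil_of_le (by omega)
        have hd : xs.drop n = [] := List.drop_eq_nil_of_le (by omega)
        rw [htake1, hd1, pvSpecRow_nil]
        rw [if_neg (by simp only [List.append_nil]; omega)]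
        rw [htake, hd, pvSpecRow_nil]
    · simp only [List.filter_cons, decide_eq_true_eq]
      rw [if_neg hc]
      rw [hcast, ih']
      by_cases hn : n < xs.length
      · have hdrop : xs.drop n = xs[n] :: xs.drop (n + 1) := List.drop_eq_getElem_cons hn
        have htake : xs.take (n + 1) = xs.take n ++ [xs[n]] := List.take_succ_eq_append_getElem hn
        rw [hdrop]
        simp only [pvSpecRow, if_pos (show (1:Int) < c by omega)]
        rw [htake, List.append_assoc, List.singleton_append]
      · have htake1 : xs.take (n + 1) = xs := List.take_of_length_le (by omega)
        have htake : xs.take n = xs := List.take_of_length_le (by omega)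
        have hd1 : xs.drop (n + 1) = [] := List.drop_eq_nil_of_le (by omega)
        have hd : xs.drop n = [] := List.drop_eq_nil_of_le (by omega)
        rw [htake1, hd1, pvSpecRow_nil, htake, hd, pvSpecRow_nil]

/-- Both row computations agree whenever the row fits inside `ci`. -/
lemma pvRow_eq (ci : List Int) (xs : List String) (h : xs.length ≤ ci.length) :
    (PySem.List.enumerate xs (0 : Int)).foldl
      (fun se p => if 1 < PySem.List.pyGetD ci p.1 0 then se ++ [p.2] else se) []
    = pvStrip xs ((((PySem.List.enumerate ci (0 : Int)).filter (fun p => decide (p.2 ≤ 1))).map (·.1)).reverse) := by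
  have hA := pvRowA ci xs 0 [] (by omega)
  have hB := pvRowB ci xs 0 (by omega)
  simp only [Nat.cast_zero] at hA hB
  rw [hA, hB]
  simp

-- ===== VERDICT (by name: the statement is the Claim_ definition above) =====
theorem erased_one_value_column_spec : Claim_equal_erased_one_value_column := by
  intro data header ci _hdom hpre
  obtain ⟨hh, hrows⟩ := hpre
  unfold Spec_erased_one_value_column erased_one_value_column erased_one_value_column_alt
  refine Prod.ext ?_ ?_
  · show data.foldl _ [] = data.map _
    rw [PySem.List.foldl_append_singleton_eq_map]
    exact List.map_congr_left (fun row hrow => pvRow_eq ci row (hrows row hrow))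
  · exact pvRow_eq ci header hh
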